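-- pv_equiv track=rewrite | github.com/Pixel-Mensch/nullsec-trader | location_utils.py | normalize_location_label
-- ===== SOURCE A (Python) =====
-- def normalize_location_label(label: str) -> str:
--     txt = str(label or "").strip().lower()
--     if not txt:
--         return ""
--     out = []
--     for ch in txt:
--         if ch.isalnum():
--             out.append(ch)
--         else:
--             out.append(" ")
--     norm = " ".join("".join(out).split())
--     if norm in ("jita", "jita iv moon 4 caldari navy assembly plant", "jita 44", "jita 4 4", "jita44"):
--         return "jita"
--     if norm == "1st" or norm.startswith("1st "):
--         return "1st"
--     if norm in ("ualx", "ualx 3", "ualx3"):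
--         return "ualx"
--     if norm in ("o 4t", "o4 t"):
--         return "o4t"
--     if norm in ("c j6mt", "cj6mt", "c j 6mt", "cj6", "c j6", "c j 6"):
--         return "c_j6mt"
--     return norm
-- ===== SOURCE B (Python) =====
-- _ALIASES = {
--     "jita": "jita",
--     "jita iv moon 4 caldari navy assembly plant": "jita",
--     "jita 44": "jita",
--     "jita 4 4": "jita",
--     "jita44": "jita",
--     "ualx": "ualx",
--     "ualx 3": "ualx",
--     "ualx3": "ualx",
--     "o 4t": "o4t",
--     "o4 t": "o4t",
--     "c j6mt": "c_j6mt",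
--     "cj6mt": "c_j6mt",
--     "c j 6mt": "c_j6mt",
--     "cj6": "c_j6mt",
--     "c j6": "c_j6mt",
--     "c j 6": "c_j6mt",
-- }
--
--
-- def normalize_location_label(label: str) -> str:
--     txt = (label or "").strip().lower()
--     out = []
--     pending = False
--     for ch in txt:
--         if ch.isalnum():
--             if pending and out:
--                 out.append(" ")
--             out.append(ch)
--             pending = False
--         else:
--             pending = True
--     norm = "".join(out)
--     hit = _ALIASES.get(norm)
--     if hit is not None:
--         return hit
--     if norm.startswith("1st "):
--         return "1st"
--     return norm
-- ===== Notes on version B (the rewrite author's own statement) =====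
-- stated objective: simpler
-- what changed: B normalizes in a single pass with a pending-separator flag (instead of A's map-to-spaces, join, re-split and re-join) and replaces A's sequential alias-tuple membership chain by one alias-to-canonical dict lookup.
import Mathlib
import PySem

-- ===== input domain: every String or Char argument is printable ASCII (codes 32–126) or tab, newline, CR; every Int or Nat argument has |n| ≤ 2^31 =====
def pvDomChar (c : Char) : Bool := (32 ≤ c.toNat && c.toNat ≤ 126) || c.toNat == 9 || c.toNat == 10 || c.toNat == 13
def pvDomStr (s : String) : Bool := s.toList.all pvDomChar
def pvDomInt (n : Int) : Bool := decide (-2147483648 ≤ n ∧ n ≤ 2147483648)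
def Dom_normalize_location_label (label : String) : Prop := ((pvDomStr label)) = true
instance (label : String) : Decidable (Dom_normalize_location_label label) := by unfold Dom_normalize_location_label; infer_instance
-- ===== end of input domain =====

-- B replaces A's build-then-resplit normalization (map to spaces, join, split, rejoin)
-- by a single pass with a pending-separator flag, and A's sequential alias-tuple
-- membership chain by one alias→canonical table lookup; objective: simpler.

-- ===== PORT A =====
def normalize_location_label (label : String) : String :=
  let txt : List Char := PySem.Chars.lower (PySem.Chars.strip label.toList)
  if txt.isEmpty then "" else
  let out : List Char :=
    txt.foldl (fun acc ch => if PySem.Chars.isalnum ch then acc ++ [ch] else acc ++ [' ']) []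
  let norm : List Char := PySem.Chars.join [' '] (PySem.Chars.split₀ out)
  if norm = "jita".toList ∨ norm = "jita iv moon 4 caldari navy assembly plant".toList ∨
     norm = "jita 44".toList ∨ norm = "jita 4 4".toList ∨ norm = "jita44".toList then "jita"
  else if norm = "1st".toList ∨ PySem.Chars.startswith norm "1st ".toList then "1st"
  else if norm = "ualx".toList ∨ norm = "ualx 3".toList ∨ norm = "ualx3".toList then "ualx"
  else if norm = "o 4t".toList ∨ norm = "o4 t".toList then "o4t"
  else if norm = "c j6mt".toList ∨ norm = "cj6mt".toList ∨ norm = "c j 6mt".toList ∨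
          norm = "cj6".toList ∨ norm = "c j6".toList ∨ norm = "c j 6".toList then "c_j6mt"
  else String.ofList norm

-- ===== PORT B =====
-- the module-level _ALIASES dict literal of Source B (all keys distinct)
def nlAliases : PySem.Dict (List Char) String :=
  PySem.Dict.mk
  [("jita".toList, "jita"),
   ("jita iv moon 4 caldari navy assembly plant".toList, "jita"),
   ("jita 44".toList, "jita"),
   ("jita 4 4".toList, "jita"),
   ("jita44".toList, "jita"),
   ("ualx".toList, "ualx"),
   ("ualx 3".toList, "ualx"),
   ("ualx3".toList, "ualx"),
   ("o 4t".toList, "o4t"),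
   ("o4 t".toList, "o4t"),
   ("c j6mt".toList, "c_j6mt"),
   ("cj6mt".toList, "c_j6mt"),
   ("c j 6mt".toList, "c_j6mt"),
   ("cj6".toList, "c_j6mt"),
   ("c j6".toList, "c_j6mt"),
   ("c j 6".toList, "c_j6mt")]

def normalize_location_label_alt (label : String) : String :=
  let txt : List Char := PySem.Chars.lower (PySem.Chars.strip label.toList)
  let norm : List Char :=
    (txt.foldl (fun (s : List Char × Bool) ch =>
        if PySem.Chars.isalnum ch then
          ((if s.2 && !s.1.isEmpty then s.1 ++ [' '] else s.1) ++ [ch], false)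
        else (s.1, true)) ([], false)).1
  match PySem.Dict.get? nlAliases norm with
  | some v => v
  | none => if PySem.Chars.startswith norm "1st ".toList then "1st" else String.ofList norm

-- ===== PRECONDITION & SPEC =====
def Spec_normalize_location_label (label : String) (out : String) : Prop := out = normalize_location_label_alt label
instance (label : String) (out : String) : Decidable (Spec_normalize_location_label label out) := by unfold Spec_normalize_location_label; infer_instance

-- ===== CLAIM (what is proved, stated in full; the proofs are below) =====
def Claim_equal_normalize_location_label : Prop := ∀ (label : String), Dom_normalize_location_label label → Spec_normalize_location_label label (normalize_location_label label)

-- ===== LEMMAS AND PROOFS =====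

-- the character mapping A's loop applies
def nlStep (ch : Char) : Char := if PySem.Chars.isalnum ch then ch else ' '

-- split₀.go on the mapped text, re-expressed as a scan of the original text
def nlGoW : List Char → List Char → List (List Char) → List (List Char)
  | [], cur, acc => if cur.isEmpty then acc.reverse else (cur.reverse :: acc).reverse
  | c :: rest, cur, acc =>
      if PySem.Chars.isalnum c then nlGoW rest (c :: cur) acc
      else if cur.isEmpty then nlGoW rest [] acc else nlGoW rest [] (cur.reverse :: acc)

-- B's loop body
def nlF (s : List Char × Bool) (ch : Char) : List Char × Bool :=
  if PySem.Chars.isalnum ch then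
    ((if s.2 && !s.1.isEmpty then s.1 ++ [' '] else s.1) ++ [ch], false)
  else (s.1, true)

lemma nl_alnum_not_space (c : Char) (h : PySem.Chars.isalnum c = true) :
    PySem.Chars.isspace c = false := by
  simp only [PySem.Chars.isalnum, PySem.Chars.isalpha, PySem.Chars.isdigit,
        PySem.Chars.isupper, PySem.Chars.islower, Bool.or_eq_true, Bool.and_eq_true,
        decide_eq_true_eq] at h
  unfold PySem.Chars.isspace
  simp only [Bool.or_eq_false_iff, Bool.and_eq_false_iff, decide_eq_false_iff_not]
  rcases h with (⟨h1, h2⟩ | ⟨h1, h2⟩) | ⟨h1, h2⟩ <;>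
  · have a1 : (65 : Nat) ≤ c.toNat ∨ (97 : Nat) ≤ c.toNat ∨ (48 : Nat) ≤ c.toNat := by
      first
      | exact Or.inl (Fin.mk_le_mk.mp h1)
      | exact Or.inr (Or.inl (Fin.mk_le_mk.mp h1))
      | exact Or.inr (Or.inr (Fin.mk_le_mk.mp h1))
    have a2 : c.toNat ≤ 90 ∨ c.toNat ≤ 122 ∨ c.toNat ≤ 57 := by
      first
      | exact Or.inl (Fin.mk_le_mk.mp h2)
      | exact Or.inr (Or.inl (Fin.mk_le_mk.mp h2))
      | exact Or.inr (Or.inr (Fin.mk_le_mk.mp h2))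
    omega

lemma nl_split_go_eq (txt : List Char) : ∀ cur acc,
    PySem.Chars.split₀.go (txt.map nlStep) cur acc = nlGoW txt cur acc := by
  induction txt with
  | nil => intro cur acc; simp [PySem.Chars.split₀.go, nlGoW, List.isEmpty_iff]
  | cons c rest ih =>
    intro cur acc
    by_cases h : PySem.Chars.isalnum c = true
    · simp [nlStep, h, PySem.Chars.split₀.go, nlGoW, nl_alnum_not_space c h, ih]
    · have hs : PySem.Chars.isspace ' ' = true := by decide
      simp [nlStep, h, PySem.Chars.split₀.go, nlGoW, hs, ih]

lemma nl_J_cons_cons (a b : List Char) (t : List (List Char)) :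
    PySem.Chars.join [' '] (a :: b :: t) = a ++ ' ' :: PySem.Chars.join [' '] (b :: t) := by
  simp [PySem.Chars.join, List.intercalate, List.intersperse]

lemma nl_J_snoc (ws : List (List Char)) (w : List Char) (h : ws ≠ []) :
    PySem.Chars.join [' '] (ws ++ [w]) = PySem.Chars.join [' '] ws ++ ' ' :: w := by
  induction ws with
  | nil => exact absurd rfl h
  | cons a t ih =>
    cases t with
    | nil => simp [PySem.Chars.join, List.intercalate]
    | cons b t' =>
      have := ih (by simp)
      simp only [List.cons_append, nl_J_cons_cons]
      rw [List.cons_append] at this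
      simp [this]

lemma nl_J_snoc_snoc (ws : List (List Char)) (w : List Char) (c : Char) :
    PySem.Chars.join [' '] (ws ++ [w ++ [c]]) = PySem.Chars.join [' '] (ws ++ [w]) ++ [c] := by
  cases ws with
  | nil => simp [PySem.Chars.join, List.intercalate]
  | cons a t =>
    rw [nl_J_snoc (a :: t) (w ++ [c]) (by simp), nl_J_snoc (a :: t) w (by simp)]
    simp

lemma nl_J_ne_nil (ws : List (List Char)) (hw : ∀ w ∈ ws, w ≠ []) (h : ws ≠ []) :
    PySem.Chars.join [' '] ws ≠ [] := by
  cases ws with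
  | nil => exact absurd rfl h
  | cons a t =>
    cases t with
    | nil => simpa [PySem.Chars.join, List.intercalate] using hw a (by simp)
    | cons b t' =>
      rw [nl_J_cons_cons]
      intro hc
      exact hw a (by simp) (List.append_eq_nil_iff.mp hc).1

-- the loop state of B that corresponds to split-scan state (cur, acc)
def nlSt (cur : List Char) (acc : List (List Char)) : List Char × Bool :=
  match cur with
  | [] => (PySem.Chars.join [' '] acc.reverse, true)
  | _ :: _ => (PySem.Chars.join [' '] (acc.reverse ++ [cur.reverse]), false)

lemma nl_fold_inv (txt : List Char) : ∀ (cur : List Char) (acc : List (List Char)),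
    (∀ w ∈ acc, w ≠ []) →
    (txt.foldl nlF (nlSt cur acc)).1 = PySem.Chars.join [' '] (nlGoW txt cur acc) := by
  induction txt with
  | nil =>
    intro cur acc _
    cases cur with
    | nil => simp [nlSt, nlGoW]
    | cons c cs => simp [nlSt, nlGoW]
  | cons c rest ih =>
    intro cur acc hacc
    by_cases hc : PySem.Chars.isalnum c = true
    · cases cur with
      | nil =>
        by_cases ha : acc = []
        · subst ha
          have := ih [c] [] (by simp)
          rw [List.foldl_cons]
          rw [show nlF (nlSt [] []) c = nlSt [c] [] by
            simp [nlF, nlSt, hc, PySem.Chars.join, List.intercalate]]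
          simpa [nlGoW, hc] using this
        · have hne : PySem.Chars.join [' '] acc.reverse ≠ [] :=
            nl_J_ne_nil acc.reverse (by simpa using hacc) (by simpa using ha)
          have := ih [c] acc hacc
          rw [List.foldl_cons]
          rw [show nlF (nlSt [] acc) c = nlSt [c] acc by
            simp [nlF, nlSt, hc, hne,
                  nl_J_snoc acc.reverse [c] (by simpa using ha)]]
          simpa [nlGoW, hc] using this
      | cons d ds =>
        have := ih (c :: d :: ds) acc hacc
        rw [List.foldl_cons]
        rw [show nlF (nlSt (d :: ds) acc) c = nlSt (c :: d :: ds) acc by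
          simp [nlF, nlSt, hc, List.reverse_cons, ← nl_J_snoc_snoc]]
        simpa [nlGoW, hc] using this
    · cases cur with
      | nil =>
        have := ih [] acc hacc
        rw [List.foldl_cons]
        rw [show nlF (nlSt [] acc) c = nlSt [] acc by simp [nlF, nlSt, hc]]
        simpa [nlGoW, hc] using this
      | cons d ds =>
        have := ih [] ((d :: ds).reverse :: acc)
          (fun w hw => by
            rcases List.mem_cons.mp hw with rfl | h
            · simp
            · exact hacc w h)
        rw [List.foldl_cons]
        rw [show nlF (nlSt (d :: ds) acc) c
              = (PySem.Chars.join [' '] (acc.reverse ++ [(d :: ds).reverse]), true) by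
          simp [nlF, nlSt, hc]]
        rw [show ((PySem.Chars.join [' '] (acc.reverse ++ [(d :: ds).reverse]), true))
              = nlSt [] ((d :: ds).reverse :: acc) by simp [nlSt]]
        simpa [nlGoW, hc] using this

lemma nl_start (txt : List Char) :
    (txt.foldl nlF ([], false)).1 = (txt.foldl nlF ([], true)).1 := by
  cases txt with
  | nil => rfl
  | cons c rest =>
    have : nlF ([], false) c = nlF ([], true) c := by
      by_cases h : PySem.Chars.isalnum c = true <;> simp [nlF, h]
    simp [List.foldl_cons, this]

-- A's appending loop builds exactly the character-wise map of nlStep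
lemma nl_loop_eq_map (txt : List Char) : ∀ acc : List Char,
    txt.foldl (fun acc ch => if PySem.Chars.isalnum ch then acc ++ [ch] else acc ++ [' ']) acc
      = acc ++ txt.map nlStep := by
  induction txt with
  | nil => intro acc; simp
  | cons c rest ih =>
    intro acc
    by_cases h : PySem.Chars.isalnum c = true <;> simp [h, nlStep, ih]

-- the two phase-1 normalizations agree on any text
lemma nl_norm_eq (txt : List Char) :
    PySem.Chars.join [' ']
        (PySem.Chars.split₀
          (txt.foldl (fun acc ch => if PySem.Chars.isalnum ch then acc ++ [ch] else acc ++ [' ']) []))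
      = (txt.foldl nlF ([], false)).1 := by
  rw [nl_loop_eq_map txt [], List.nil_append, nl_start]
  have h2 := nl_fold_inv txt [] [] (by simp)
  rw [show nlSt [] [] = ([], true) by simp [nlSt, PySem.Chars.join, List.intercalate]] at h2
  rw [show PySem.Chars.split₀ (txt.map nlStep) = PySem.Chars.split₀.go (txt.map nlStep) [] []
        from rfl,
      nl_split_go_eq]
  exact h2.symm

-- the two selectors agree on any normalized text
lemma nl_select_eq (n : List Char) :
    (if n = "jita".toList ∨ n = "jita iv moon 4 caldari navy assembly plant".toList ∨
        n = "jita 44".toList ∨ n = "jita 4 4".toList ∨ n = "jita44".toList then "jita"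
     else if n = "1st".toList ∨ PySem.Chars.startswith n "1st ".toList then "1st"
     else if n = "ualx".toList ∨ n = "ualx 3".toList ∨ n = "ualx3".toList then "ualx"
     else if n = "o 4t".toList ∨ n = "o4 t".toList then "o4t"
     else if n = "c j6mt".toList ∨ n = "cj6mt".toList ∨ n = "c j 6mt".toList ∨
             n = "cj6".toList ∨ n = "c j6".toList ∨ n = "c j 6".toList then "c_j6mt"
     else String.ofList n)
    = (match PySem.Dict.get? nlAliases n with
       | some v => v
       | none => if PySem.Chars.startswith n "1st ".toList then "1st" else String.ofList n) := by
  by_cases h1 : n = "jita".toList; · subst h1; decide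
  by_cases h2 : n = "jita iv moon 4 caldari navy assembly plant".toList; · subst h2; decide
  by_cases h3 : n = "jita 44".toList; · subst h3; decide
  by_cases h4 : n = "jita 4 4".toList; · subst h4; decide
  by_cases h5 : n = "jita44".toList; · subst h5; decide
  by_cases h6 : n = "ualx".toList; · subst h6; decide
  by_cases h7 : n = "ualx 3".toList; · subst h7; decide
  by_cases h8 : n = "ualx3".toList; · subst h8; decide
  by_cases h9 : n = "o 4t".toList; · subst h9; decide
  by_cases h10 : n = "o4 t".toList; · subst h10; decide
  by_cases h11 : n = "c j6mt".toList; · subst h11; decide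
  by_cases h12 : n = "cj6mt".toList; · subst h12; decide
  by_cases h13 : n = "c j 6mt".toList; · subst h13; decide
  by_cases h14 : n = "cj6".toList; · subst h14; decide
  by_cases h15 : n = "c j6".toList; · subst h15; decide
  by_cases h16 : n = "c j 6".toList; · subst h16; decide
  simp at h1 h2 h3 h4 h5 h6 h7 h8 h9 h10 h11 h12 h13 h14 h15 h16
  have hnone : PySem.Dict.get? nlAliases n = none := by
    simp [nlAliases, PySem.Dict.get?]
    exact ⟨fun e => h1 e.symm, fun e => h2 e.symm, fun e => h3 e.symm, fun e => h4 e.symm,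
           fun e => h5 e.symm, fun e => h6 e.symm, fun e => h7 e.symm, fun e => h8 e.symm,
           fun e => h9 e.symm, fun e => h10 e.symm, fun e => h11 e.symm, fun e => h12 e.symm,
           fun e => h13 e.symm, fun e => h14 e.symm, fun e => h15 e.symm, fun e => h16 e.symm⟩
  rw [hnone]
  by_cases hst : n = "1st".toList
  · subst hst; decide
  · simp at hst
    simp [h1, h2, h3, h4, h5, h6, h7, h8, h9, h10, h11, h12, h13, h14, h15, h16, hst]

-- ===== VERDICT (by name: the statement is the Claim_ definition above) =====
theorem normalize_location_label_spec : Claim_equal_normalize_location_label := by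
  intro label _
  unfold Spec_normalize_location_label normalize_location_label normalize_location_label_alt
  by_cases he : (PySem.Chars.lower (PySem.Chars.strip label.toList)).isEmpty = true
  · have : PySem.Chars.lower (PySem.Chars.strip label.toList) = [] := by
      simpa [List.isEmpty_iff] using he
    rw [this]
    decide
  · simp only [Bool.not_eq_true] at *
    rw [if_neg (by simp [he])]
    rw [nl_norm_eq (PySem.Chars.lower (PySem.Chars.strip label.toList))]
    exact nl_select_eq _
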